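-- pv_equiv track=rewrite | github.com/Gyuchool/Algorithm | 프로그래머스/코딩테스트/숫자 카드 나누기.py | solution
-- ===== SOURCE A (Python) =====
-- import math
--
-- def solution(arrayA, arrayB):
--     answer = 0
--     gcdA= arrayA[0]
--     for a in arrayA:
--         gcdA = math.gcd(gcdA, a)
--
--     out=False
--     for b in arrayB:
--         if b%gcdA == 0:
--             out = True
--             break
--
--     gcdB = arrayB[0]
--     for b in arrayB:
--         gcdB = math.gcd(gcdB, b)
--
--     out2 = False
--     for a in arrayA:
--         if a % gcdB == 0:
--             out2 = True
--             break
--     if out and out2: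
--         return 0
--     elif out and not out2:
--         return gcdB
--     elif out2 and not out:
--         return gcdA
--     else:
--         return max(gcdA, gcdB)
-- ===== SOURCE B (Python) =====
-- import math
--
-- def solution(arrayA, arrayB):
--     # divide-and-conquer gcd over index segments, count-based validity, branch-free-ish result
--     def seg_gcd(lst, lo, hi):
--         if hi - lo == 1:
--             return abs(lst[lo])
--         mid = (lo + hi) // 2
--         return math.gcd(seg_gcd(lst, lo, mid), seg_gcd(lst, mid, hi))
--
--     gA = seg_gcd(arrayA, 0, len(arrayA))
--     gB = seg_gcd(arrayB, 0, len(arrayB))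
--     mulA = sum(1 for a in arrayA if a % gB == 0)
--     mulB = sum(1 for b in arrayB if b % gA == 0)
--     res = 0
--     if mulB == 0:
--         res = gA
--     if mulA == 0 and gB > res:
--         res = gB
--     return res
-- ===== Notes on version B (the rewrite author's own statement) =====
-- stated objective: alternative
-- what changed: Replaces the seeded linear gcd folds with a recursive divide-and-conquer gcd over index segments, replaces the break-flag divisibility loops with multiple counts (sum of matches, valid iff count==0), and replaces the 4-way if/elif cascade with two sequential updates of a running result.
import Mathlib
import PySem

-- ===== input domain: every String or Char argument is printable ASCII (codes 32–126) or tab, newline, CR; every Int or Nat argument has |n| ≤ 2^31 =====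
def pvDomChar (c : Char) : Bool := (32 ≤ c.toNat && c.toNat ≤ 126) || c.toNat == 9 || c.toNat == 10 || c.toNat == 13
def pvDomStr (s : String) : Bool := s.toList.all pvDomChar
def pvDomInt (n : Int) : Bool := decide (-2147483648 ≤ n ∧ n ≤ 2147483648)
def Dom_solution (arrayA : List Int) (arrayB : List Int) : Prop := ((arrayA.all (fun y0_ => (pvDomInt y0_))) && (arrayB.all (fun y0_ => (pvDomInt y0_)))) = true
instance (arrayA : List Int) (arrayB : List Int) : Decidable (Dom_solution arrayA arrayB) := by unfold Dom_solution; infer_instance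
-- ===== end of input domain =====

-- B computes each gcd by recursive divide-and-conquer over index segments, decides validity
-- by counting multiples (count == 0), and replaces A's 4-way cascade with two result updates
-- (objective: alternative decomposition, same cost).


-- ===== PORT A =====
-- math.gcd is nonnegative: (Int.gcd g a : Int). arrayA[0] is read via headD 0;
-- Pre_solution guarantees nonemptiness, so the default is never used inside the claim.
def solution (arrayA : List Int) (arrayB : List Int) : Int :=
  let gcdA := arrayA.foldl (fun g a => (Int.gcd g a : Int)) (arrayA.headD 0)
  -- for b in arrayB: if b % gcdA == 0: out = True; break
  let out := arrayB.any (fun b => PySem.Int.mod b gcdA == 0)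
  let gcdB := arrayB.foldl (fun g b => (Int.gcd g b : Int)) (arrayB.headD 0)
  let out2 := arrayA.any (fun a => PySem.Int.mod a gcdB == 0)
  if out && out2 then 0
  else if out && !out2 then gcdB
  else if out2 && !out then gcdA
  else max gcdA gcdB

-- ===== PORT B =====
-- Python's seg_gcd(lst, lo, hi): gcd of lst[lo:hi] by halving the index range.
-- Base case reads lst[lo] (always in range on reachable calls; getD 0 is a totalization
-- guard); the `hi - lo ≤ 1` test totalizes the empty range on which Python never returns.
def segGcd (lst : List Int) (lo hi : Nat) : Int :=
  if hi - lo ≤ 1 then ((lst.getD lo 0).natAbs : Int)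
  else
    let mid := (lo + hi) / 2
    (Int.gcd (segGcd lst lo mid) (segGcd lst mid hi) : Int)
termination_by hi - lo
decreasing_by all_goals omega

def solution_alt (arrayA : List Int) (arrayB : List Int) : Int :=
  let gA := segGcd arrayA 0 arrayA.length
  let gB := segGcd arrayB 0 arrayB.length
  let mulA : Int := (arrayA.countP (fun a => PySem.Int.mod a gB == 0) : Int)
  let mulB : Int := (arrayB.countP (fun b => PySem.Int.mod b gA == 0) : Int)
  let res0 : Int := 0
  let res1 := if mulB = 0 then gA else res0
  let res2 := if mulA = 0 ∧ gB > res1 then gB else res1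
  res2

-- ===== PRECONDITION & SPEC =====
-- Pre_ excludes exactly the inputs on which A raises: an empty array (IndexError at
-- arrayA[0]/arrayB[0]) or an all-zero array (its gcd is 0, so the '% gcd' test raises
-- ZeroDivisionError). A returns on every other input.
def Pre_solution (arrayA : List Int) (arrayB : List Int) : Prop :=
  (∃ a ∈ arrayA, a ≠ 0) ∧ (∃ b ∈ arrayB, b ≠ 0)
instance (arrayA : List Int) (arrayB : List Int) : Decidable (Pre_solution arrayA arrayB) := by unfold Pre_solution; infer_instance
def pvWitness_solution : List Int × List Int := ([6, 8], [9, 15])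
def Spec_solution (arrayA : List Int) (arrayB : List Int) (out : Int) : Prop := out = solution_alt arrayA arrayB
instance (arrayA : List Int) (arrayB : List Int) (out : Int) : Decidable (Spec_solution arrayA arrayB out) := by unfold Spec_solution; infer_instance

-- ===== CLAIM (what is proved, stated in full; the proofs are below) =====
def Claim_equal_solution : Prop := ∀ (arrayA : List Int) (arrayB : List Int), Dom_solution arrayA arrayB → Pre_solution arrayA arrayB → Spec_solution arrayA arrayB (solution arrayA arrayB)

-- ===== LEMMAS AND PROOFS =====

theorem gcd_foldl_nonneg (xs : List Int) (s : Int) (hs : 0 ≤ s) :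
    0 ≤ xs.foldl (fun g a => (Int.gcd g a : Int)) s := by
  induction xs generalizing s with
  | nil => exact hs
  | cons x xs ih => exact ih _ (Int.natCast_nonneg _)

theorem gcd_foldl_seed_ne (xs : List Int) (s : Int) (hs : s ≠ 0) :
    xs.foldl (fun g a => (Int.gcd g a : Int)) s ≠ 0 := by
  induction xs generalizing s with
  | nil => exact hs
  | cons y ys ih =>
    apply ih
    simp only [ne_eq, Int.natCast_eq_zero, Int.gcd_eq_zero_iff, not_and]
    intro h; exact absurd h hs

theorem gcd_foldl_ne_zero (xs : List Int) (s : Int) (h : ∃ a ∈ xs, a ≠ 0) :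
    xs.foldl (fun g a => (Int.gcd g a : Int)) s ≠ 0 := by
  induction xs generalizing s with
  | nil => simp at h
  | cons x xs ih =>
    rcases h with ⟨a, ha, hane⟩
    rcases List.mem_cons.mp ha with rfl | hmem
    · simp only [List.foldl_cons]
      apply gcd_foldl_seed_ne
      intro heq
      have h0 : Int.gcd s a = 0 := Int.natCast_eq_zero.mp heq
      exact hane (Int.gcd_eq_zero_iff.mp h0).2
    · exact ih _ ⟨a, hmem, hane⟩

-- A seeds the gcd fold with the first element; over a nonempty list that equals seed 0.
theorem gcd_foldl_head_eq_zero (x : Int) (xs : List Int) :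
    (x :: xs).foldl (fun g a => (Int.gcd g a : Int)) x
      = (x :: xs).foldl (fun g a => (Int.gcd g a : Int)) 0 := by
  simp [List.foldl_cons, Int.gcd_self]

-- folding gcd from a nonnegative seed = gcd of the seed with the 0-seeded fold
theorem gcd_foldl_seed (ys : List Int) (s : Int) (hs : 0 ≤ s) :
    ys.foldl (fun g a => (Int.gcd g a : Int)) s
      = (Int.gcd s (ys.foldl (fun g a => (Int.gcd g a : Int)) 0) : Int) := by
  induction ys generalizing s with
  | nil =>
    simp only [List.foldl_nil, Int.gcd_zero_right]
    omega
  | cons y ys ih =>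
    simp only [List.foldl_cons]
    rw [ih ((Int.gcd s y : Nat) : Int) (Int.natCast_nonneg _),
        ih ((Int.gcd 0 y : Nat) : Int) (Int.natCast_nonneg _)]
    congr 1
    simp [Int.gcd, Int.natAbs_natCast, Nat.gcd_assoc, Int.natAbs_abs]

theorem gcd_foldl_append (xs ys : List Int) :
    (xs ++ ys).foldl (fun g a => (Int.gcd g a : Int)) 0
      = (Int.gcd (xs.foldl (fun g a => (Int.gcd g a : Int)) 0)
                 (ys.foldl (fun g a => (Int.gcd g a : Int)) 0) : Int) := by
  rw [List.foldl_append]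
  exact gcd_foldl_seed ys _ (gcd_foldl_nonneg xs 0 le_rfl)

-- segGcd over a valid index range computes the 0-seeded gcd fold of that slice.
theorem segGcd_eq_foldl (lst : List Int) (lo hi : Nat)
    (hlt : lo < hi) (hle : hi ≤ lst.length) :
    segGcd lst lo hi
      = ((lst.drop lo).take (hi - lo)).foldl (fun g a => (Int.gcd g a : Int)) 0 := by
  rw [segGcd]
  by_cases h1 : hi - lo ≤ 1
  · have h : hi = lo + 1 := by omega
    subst h
    have hlo : lo < lst.length := by omega
    obtain ⟨z, zs, hd⟩ : ∃ z zs, lst.drop lo = z :: zs := by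
      cases hd : lst.drop lo with
      | nil =>
        exfalso
        have := congrArg List.length hd
        simp [List.length_drop] at this
        omega
      | cons z zs => exact ⟨z, zs, rfl⟩
    have hz : lst.getD lo 0 = z := by
      have h? : lst[lo]? = some z := by
        rw [← List.head?_drop, hd, List.head?_cons]
      rw [List.getD_eq_getElem?_getD, h?]
      rfl
    rw [if_pos h1]
    simp only [Nat.add_sub_cancel_left, hd, List.take_succ_cons,
      List.take_zero, List.foldl_cons, List.foldl_nil, hz]
    simp [Int.gcd]
  · simp only [h1, if_false]
    have hmid1 : lo < (lo + hi) / 2 := by omega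
    have hmid2 : (lo + hi) / 2 < hi := by omega
    rw [segGcd_eq_foldl lst lo ((lo + hi) / 2) hmid1 (by omega),
        segGcd_eq_foldl lst ((lo + hi) / 2) hi hmid2 hle,
        ← gcd_foldl_append]
    congr 1
    have h2 : hi - lo = ((lo + hi) / 2 - lo) + (hi - (lo + hi) / 2) := by omega
    rw [h2, List.take_add, List.drop_drop]
    have h3 : lo + ((lo + hi) / 2 - lo) = (lo + hi) / 2 := by omega
    rw [h3]
termination_by hi - lo
decreasing_by all_goals omega

theorem segGcd_full (lst : List Int) (h : lst ≠ []) :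
    segGcd lst 0 lst.length = lst.foldl (fun g a => (Int.gcd g a : Int)) 0 := by
  rw [segGcd_eq_foldl lst 0 lst.length (List.length_pos_iff.mpr h) le_rfl]
  simp

theorem countP_zero_iff_not_any (xs : List Int) (p : Int → Bool) :
    ((xs.countP p : Int) = 0) ↔ (xs.any p = false) := by
  simp [List.countP_eq_zero, List.any_eq_false]

-- ===== VERDICT (by name: the statement is the Claim_ definition above) =====
theorem solution_spec : Claim_equal_solution := by
  intro arrayA arrayB _ hpre
  obtain ⟨hA, hB⟩ := hpre
  have hAne : arrayA ≠ [] := by rintro rfl; simp at hA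
  have hBne : arrayB ≠ [] := by rintro rfl; simp at hB
  unfold Spec_solution solution solution_alt
  rw [segGcd_full arrayA hAne, segGcd_full arrayB hBne]
  obtain ⟨x, xs, rfl⟩ : ∃ x xs, arrayA = x :: xs := by
    rcases arrayA with _ | ⟨x, xs⟩
    · exact absurd rfl hAne
    · exact ⟨x, xs, rfl⟩
  obtain ⟨y, ys, rfl⟩ : ∃ y ys, arrayB = y :: ys := by
    rcases arrayB with _ | ⟨y, ys⟩
    · exact absurd rfl hBne
    · exact ⟨y, ys, rfl⟩
  simp only [List.headD_cons]
  rw [gcd_foldl_head_eq_zero x xs, gcd_foldl_head_eq_zero y ys]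
  set gA := (x :: xs).foldl (fun g a => (Int.gcd g a : Int)) 0 with hgA
  set gB := (y :: ys).foldl (fun g b => (Int.gcd g b : Int)) 0 with hgB
  have hgApos : 0 < gA :=
    lt_of_le_of_ne (gcd_foldl_nonneg _ _ le_rfl) (Ne.symm (gcd_foldl_ne_zero _ _ hA))
  have hgBpos : 0 < gB :=
    lt_of_le_of_ne (gcd_foldl_nonneg _ _ le_rfl) (Ne.symm (gcd_foldl_ne_zero _ _ hB))
  have hcB := countP_zero_iff_not_any (y :: ys) (fun b => PySem.Int.mod b gA == 0)
  have hcA := countP_zero_iff_not_any (x :: xs) (fun a => PySem.Int.mod a gB == 0)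
  by_cases hob : (y :: ys).any (fun b => PySem.Int.mod b gA == 0) = true <;>
    by_cases hoa : (x :: xs).any (fun a => PySem.Int.mod a gB == 0) = true
  · -- out ∧ out2 : A returns 0; B: both counts nonzero, res stays 0
    have h1 : ¬ (((y :: ys).countP (fun b => PySem.Int.mod b gA == 0) : Int) = 0) := by
      rw [hcB, hob]; simp
    have h2 : ¬ (((x :: xs).countP (fun a => PySem.Int.mod a gB == 0) : Int) = 0) := by
      rw [hcA, hoa]; simp
    rw [if_neg h1,
        if_neg (show ¬((((x :: xs).countP (fun a => PySem.Int.mod a gB == 0) : Int) = 0) ∧ gB > 0)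
          from fun h => h2 h.1),
        hob, hoa]
    simp
  · -- out ∧ ¬out2 : A returns gB; B: res1 = 0, then count_A = 0 ∧ gB > 0 → gB
    rw [Bool.not_eq_true] at hoa
    have h1 : ¬ (((y :: ys).countP (fun b => PySem.Int.mod b gA == 0) : Int) = 0) := by
      rw [hcB, hob]; simp
    have h2 : (((x :: xs).countP (fun a => PySem.Int.mod a gB == 0) : Int) = 0) := hcA.mpr hoa
    rw [if_neg h1,
        if_pos (show (((x :: xs).countP (fun a => PySem.Int.mod a gB == 0) : Int) = 0) ∧ gB > 0
          from ⟨h2, hgBpos⟩),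
        hob, hoa]
    simp
  · -- ¬out ∧ out2 : A returns gA; B: res1 = gA, second update skipped
    rw [Bool.not_eq_true] at hob
    have h1 : (((y :: ys).countP (fun b => PySem.Int.mod b gA == 0) : Int) = 0) := hcB.mpr hob
    have h2 : ¬ (((x :: xs).countP (fun a => PySem.Int.mod a gB == 0) : Int) = 0) := by
      rw [hcA, hoa]; simp
    rw [if_pos h1,
        if_neg (show ¬((((x :: xs).countP (fun a => PySem.Int.mod a gB == 0) : Int) = 0) ∧ gB > gA)
          from fun h => h2 h.1),
        hob, hoa]
    simp
  · -- neither : A returns max gA gB; B: res1 = gA, then gB if gB > gA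
    rw [Bool.not_eq_true] at hob hoa
    have h1 : (((y :: ys).countP (fun b => PySem.Int.mod b gA == 0) : Int) = 0) := hcB.mpr hob
    have h2 : (((x :: xs).countP (fun a => PySem.Int.mod a gB == 0) : Int) = 0) := hcA.mpr hoa
    rw [if_pos h1]
    by_cases hgt : gA < gB
    · rw [if_pos (show (((x :: xs).countP (fun a => PySem.Int.mod a gB == 0) : Int) = 0) ∧ gB > gA
            from ⟨h2, hgt⟩),
          hob, hoa]
      simp [max_eq_right hgt.le]
    · rw [if_neg (show ¬((((x :: xs).countP (fun a => PySem.Int.mod a gB == 0) : Int) = 0) ∧ gB > gA)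
            from fun h => hgt h.2),
          hob, hoa]
      simp [max_eq_left (not_lt.mp hgt)]
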